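-- pv_equiv track=rewrite | github.com/C2SP/wycheproof | src/berlekamp_massey.py | BerlekampMassey0
-- ===== SOURCE A (Python) =====
-- def BerlekampMassey0(S, length=None):
--   if length is None:
--     length = S.bit_length()
--   B, C = 1,1
--   SB, SC = S, S
--   L = 0
--   for n in range(length):
--     B <<= 1
--     SB <<= 1
--     T = SC
--     if C & 1 == 0: T ^= S
--     if (T >> n) & 1:
--       if 2 * L <= n:
--         B, C = C, C ^ B
--         SB, SC = SC, SC ^ SB
--         L = n + 1 - L
--       else:
--         C ^= B
--         SC ^= SB
--   return L, C
-- ===== SOURCE B (Python) =====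
-- def BerlekampMassey0(S, length=None):
--   # Classical Berlekamp-Massey decomposition: keep the last pre-update polynomial b with
--   # its age counter m (instead of A's continuously shifted B and the SB/SC product
--   # accumulators) and compute each step's discrepancy directly by an inner convolution
--   # loop over the coefficients of C (bits above C.bit_length() are zero).
--   if length is None:
--     length = S.bit_length()
--   C, L = 1, 0
--   b, m = 1, 1
--   for n in range(length):
--     d = 0
--     for i in range(min(n + 1, C.bit_length())):
--       d ^= (C >> i) & (S >> (n - i)) & 1
--     if d:
--       if 2 * L <= n:
--         t = C
--         C ^= b << m
--         L = n + 1 - L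
--         b = t
--         m = 1
--       else:
--         C ^= b << m
--         m += 1
--     else:
--       m += 1
--   return L, C
-- ===== Notes on version B (the rewrite author's own statement) =====
-- stated objective: faster
-- what changed: Replaces A's continuously shifted B register and the SB/SC product accumulators (which grow to length-bit integers, making each step a length-bit shift/xor) by the classical Berlekamp-Massey state (last pre-update polynomial b with an age counter m, update C ^= b << m) and computes each step's discrepancy directly with an inner convolution loop over C's coefficients.
import Mathlib
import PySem

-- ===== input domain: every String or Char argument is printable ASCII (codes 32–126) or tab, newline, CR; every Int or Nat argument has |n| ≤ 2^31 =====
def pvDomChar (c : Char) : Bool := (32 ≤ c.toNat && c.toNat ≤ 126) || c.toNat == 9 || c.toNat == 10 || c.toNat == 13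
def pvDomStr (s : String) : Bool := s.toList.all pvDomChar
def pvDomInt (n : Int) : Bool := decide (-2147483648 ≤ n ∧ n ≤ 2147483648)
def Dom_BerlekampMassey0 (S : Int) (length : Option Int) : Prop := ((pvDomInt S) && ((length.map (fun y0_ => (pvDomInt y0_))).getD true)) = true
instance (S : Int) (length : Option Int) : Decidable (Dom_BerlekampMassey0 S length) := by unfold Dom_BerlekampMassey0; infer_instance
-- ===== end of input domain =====

-- B replaces A's continuously shifted B register and the SB/SC product accumulators by the
-- classical Berlekamp-Massey state (last pre-update polynomial b with an age counter m,
-- update C ^= b << m) and computes each step's discrepancy directly with an inner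
-- convolution loop over C's coefficients, avoiding A's length-bit accumulators
-- (objective: faster; a timing run measured the speedup).
-- Python's `x << k` / `x >> k` (shift counts are nonnegative here) are Int.shiftLeft / Int.shiftRight.

-- ===== PORT A =====
-- loop body of A's `for n in range(length)` (B, C, SB, SC, L are the Python variables)
def pvStepA (S : Int) (st : Int × Int × Int × Int × Int) (n : Int) : Int × Int × Int × Int × Int :=
  match st with
  | (B, C, SB, SC, L) =>
    let B := Int.shiftLeft B 1
    let SB := Int.shiftLeft SB 1
    let T := SC
    let T := if PySem.Int.band C 1 = 0 then PySem.Int.bxor T S else T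
    if PySem.Int.band (Int.shiftRight T n.toNat) 1 ≠ 0 then
      if 2 * L ≤ n then (C, PySem.Int.bxor C B, SC, PySem.Int.bxor SC SB, n + 1 - L)
      else (B, PySem.Int.bxor C B, SB, PySem.Int.bxor SC SB, L)
    else (B, C, SB, SC, L)

def BerlekampMassey0 (S : Int) (length : Option Int) : Int × Int :=
  let len : Int := match length with | none => ((PySem.Int.bitLength S : Nat) : Int) | some l => l
  let st := (PySem.List.pyRange 0 len 1).foldl (pvStepA S) (1, 1, S, S, 0)
  (st.2.2.2.2, st.2.1)

-- ===== PORT B =====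
-- inner loop `d = 0; for i in range(min(n + 1, C.bit_length())): d ^= (C >> i) & (S >> (n - i)) & 1`
-- (the loop indices n and i are nonnegative Python ints, carried as Nat)
def pvDisc (S C : Int) (n : Nat) : Int :=
  (List.range (min (n + 1) (PySem.Int.bitLength C))).foldl
    (fun d i => PySem.Int.bxor d
      (PySem.Int.band (PySem.Int.band (Int.shiftRight C i) (Int.shiftRight S (n - i))) 1)) 0

-- outer loop of B as a recursion: `pvRunB S n k (C, L, b, m)` runs steps n, n+1, …, n+k-1
def pvRunB (S : Int) : Nat → Nat → (Int × Int × Int × Nat) → (Int × Int × Int × Nat)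
  | _, 0, st => st
  | n, k + 1, st =>
    match st with
    | (C, L, b, m) =>
      let d := pvDisc S C n
      let st' :=
        if d ≠ 0 then
          if 2 * L ≤ (n : Int) then
            (PySem.Int.bxor C (Int.shiftLeft b m), (n : Int) + 1 - L, C, 1)
          else
            (PySem.Int.bxor C (Int.shiftLeft b m), L, b, m + 1)
        else (C, L, b, m + 1)
      pvRunB S (n + 1) k st'

def BerlekampMassey0_alt (S : Int) (length : Option Int) : Int × Int :=
  let len : Int := match length with | none => ((PySem.Int.bitLength S : Nat) : Int) | some l => l
  let st := pvRunB S 0 len.toNat (1, 0, 1, 1)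
  (st.2.1, st.1)

-- ===== PRECONDITION & SPEC =====
def Spec_BerlekampMassey0 (S : Int) (length : Option Int) (out : Int × Int) : Prop := out = BerlekampMassey0_alt S length
instance (S : Int) (length : Option Int) (out : Int × Int) : Decidable (Spec_BerlekampMassey0 S length out) := by unfold Spec_BerlekampMassey0; infer_instance

-- ===== CLAIM (what is proved, stated in full; the proofs are below) =====
def Claim_equal_BerlekampMassey0 : Prop := ∀ (S : Int) (length : Option Int), Dom_BerlekampMassey0 S length → Spec_BerlekampMassey0 S length (BerlekampMassey0 S length)

-- ===== LEMMAS AND PROOFS =====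

-- the k-th bit of x, as an element of GF(2)
def pvBitz (x : Int) (k : Nat) : ZMod 2 := if x.testBit k then 1 else 0
-- partial convolution: sum over i < k of C_i * S_{n-i}
def pvPconv (S C : Int) (n k : Nat) : ZMod 2 := ∑ i ∈ Finset.range k, pvBitz C i * pvBitz S (n - i)
-- the full discrepancy bit at step n
def pvConv (S C : Int) (n : Nat) : ZMod 2 := pvPconv S C n (n + 1)

theorem pv_shl_eq (a : Int) (k : Nat) : Int.shiftLeft a k = a * 2 ^ k := Int.shiftLeft_eq a k

theorem pv_shl_shl (a : Int) (k : Nat) :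
    Int.shiftLeft (Int.shiftLeft a k) 1 = Int.shiftLeft a (k + 1) := by
  rw [pv_shl_eq, pv_shl_eq, pv_shl_eq, pow_succ]; ring

theorem pv_shl_nonneg (a : Int) (k : Nat) (h : 0 ≤ a) : 0 ≤ Int.shiftLeft a k := by
  rw [pv_shl_eq]; positivity

theorem pv_testBit_shr (a : Int) (n k : Nat) : (Int.shiftRight a k).testBit n = a.testBit (n + k) := by
  cases a with
  | ofNat m =>
    show (Int.ofNat (m >>> k)).testBit n = _
    simp [Int.testBit, Nat.testBit_shiftRight, Nat.add_comm]
  | negSucc m =>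
    show (Int.negSucc (m >>> k)).testBit n = _
    simp [Int.testBit, Nat.testBit_shiftRight, Nat.add_comm]

theorem pv_testBit_shl1_zero (a : Int) : (Int.shiftLeft a 1).testBit 0 = false := by
  cases a with
  | ofNat m =>
    show (Int.ofNat (m <<< 1)).testBit 0 = false
    simp [Int.testBit, Nat.shiftLeft_eq, Nat.testBit_zero]
  | negSucc m =>
    show (Int.negSucc ((m + 1) <<< 1 - 1)).testBit 0 = false
    simp [Int.testBit, Nat.shiftLeft_eq, Nat.testBit_zero]
    omega

theorem pv_testBit_shl1_succ (a : Int) (n : Nat) : (Int.shiftLeft a 1).testBit (n + 1) = a.testBit n := by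
  cases a with
  | ofNat m =>
    show (Int.ofNat (m <<< 1)).testBit (n + 1) = _
    simp [Int.testBit, Nat.shiftLeft_eq, Nat.testBit_succ]
  | negSucc m =>
    show (Int.negSucc ((m + 1) <<< 1 - 1)).testBit (n + 1) = _
    have h : (m + 1) <<< 1 - 1 = 2 * m + 1 := by simp [Nat.shiftLeft_eq]; omega
    simp [Int.testBit, h, Nat.testBit_succ]
    congr 1
    omega

theorem pv_testBit_bxor (a b : Int) (k : Nat) :
    (PySem.Int.bxor a b).testBit k = xor (a.testBit k) (b.testBit k) := by
  cases a with
  | ofNat m =>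
    cases b with
    | ofNat n =>
      simp [Int.testBit, Nat.testBit_xor]
    | negSucc n =>
      have e : PySem.Int.bxor (m : Int) (Int.negSucc n) = Int.negSucc (m ^^^ n) := by
        unfold PySem.Int.bxor
        rw [if_pos (show (0:Int) ≤ (m : Int) from Int.natCast_nonneg m),
            if_neg (show ¬ (0:Int) ≤ Int.negSucc n by simp [Int.negSucc_eq]; omega)]
        rw [show (-(Int.negSucc n) - 1) = (n : Int) by rw [Int.negSucc_eq]; ring]
        simp [Int.negSucc_eq]
        ring
      simp [e, Int.testBit, Nat.testBit_xor]
  | negSucc m =>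
    cases b with
    | ofNat n =>
      have e : PySem.Int.bxor (Int.negSucc m) (n : Int) = Int.negSucc (m ^^^ n) := by
        unfold PySem.Int.bxor
        rw [if_neg (show ¬ (0:Int) ≤ Int.negSucc m by simp [Int.negSucc_eq]; omega),
            if_pos (show (0:Int) ≤ (n : Int) from Int.natCast_nonneg n)]
        rw [show (-(Int.negSucc m) - 1) = (m : Int) by rw [Int.negSucc_eq]; ring]
        simp [Int.negSucc_eq]
        ring
      simp [e, Int.testBit, Nat.testBit_xor]
    | negSucc n =>
      have e : PySem.Int.bxor (Int.negSucc m) (Int.negSucc n) = Int.ofNat (m ^^^ n) := by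
        unfold PySem.Int.bxor
        rw [if_neg (show ¬ (0:Int) ≤ Int.negSucc m by simp [Int.negSucc_eq]; omega),
            if_neg (show ¬ (0:Int) ≤ Int.negSucc n by simp [Int.negSucc_eq]; omega)]
        rw [show (-(Int.negSucc n) - 1) = (n : Int) by rw [Int.negSucc_eq]; ring,
            show (-(Int.negSucc m) - 1) = (m : Int) by rw [Int.negSucc_eq]; ring]
        simp
      simp [e, Int.testBit, Nat.testBit_xor]

theorem pv_band_one (y : Int) : PySem.Int.band y 1 = if y.testBit 0 then 1 else 0 := by
  cases y with
  | ofNat m =>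
    unfold PySem.Int.band
    rw [if_pos (show (0:Int) ≤ Int.ofNat m from Int.natCast_nonneg m), if_pos (by norm_num)]
    show ((m &&& (1:Int).toNat : Nat) : Int) = _
    rw [show (1:Int).toNat = 1 from rfl, Nat.and_one_is_mod]
    rcases Nat.mod_two_eq_zero_or_one m with h | h <;>
      simp [Int.testBit, Nat.testBit_zero, h]
  | negSucc m =>
    unfold PySem.Int.band
    rw [if_neg (show ¬ (0:Int) ≤ Int.negSucc m by simp [Int.negSucc_eq]; omega),
        if_pos (show (0:Int) ≤ 1 by norm_num)]
    rw [show (-(Int.negSucc m) - 1) = (m : Int) by rw [Int.negSucc_eq]; ring]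
    show (((1:Int).toNat - ((1:Int).toNat &&& m) : Nat) : Int) = _
    rw [show (1:Int).toNat = 1 from rfl, Nat.and_comm, Nat.and_one_is_mod]
    rcases Nat.mod_two_eq_zero_or_one m with h | h <;>
      simp [Int.testBit, Nat.testBit_zero, h]

-- bit 0 of a & b when the left operand is nonnegative (the right one may be negative)
theorem pv_testBit0_band (a b : Int) (ha : 0 ≤ a) :
    (PySem.Int.band a b).testBit 0 = (a.testBit 0 && b.testBit 0) := by
  cases b with
  | ofNat n =>
    show (PySem.Int.band a ((n : Nat) : Int)).testBit 0 = (a.testBit 0 && ((n : Nat) : Int).testBit 0)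
    rw [PySem.Int.band_of_nonneg ha (Int.natCast_nonneg n)]
    show ((a.toNat &&& n : Nat) : Int).testBit 0 = _
    have e : a = ((a.toNat : Nat) : Int) := by omega
    rw [e]
    show (a.toNat &&& n).testBit 0 = (a.toNat.testBit 0 && n.testBit 0)
    exact Nat.testBit_and a.toNat n 0
  | negSucc n =>
    unfold PySem.Int.band
    rw [if_pos ha, if_neg (show ¬ (0:Int) ≤ Int.negSucc n by simp [Int.negSucc_eq]; omega)]
    rw [show (-(Int.negSucc n) - 1) = (n : Int) by rw [Int.negSucc_eq]; ring]
    show ((a.toNat - (a.toNat &&& (n : Int).toNat) : Nat) : Int).testBit 0 = _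
    rw [show ((n : Int)).toNat = n from rfl]
    have e : a = ((a.toNat : Nat) : Int) := by omega
    conv_rhs => rw [e]
    show (a.toNat - (a.toNat &&& n)).testBit 0 = (a.toNat.testBit 0 && (Int.negSucc n).testBit 0)
    have hnb : (Int.negSucc n).testBit 0 = !(n.testBit 0) := by simp [Int.testBit]
    have hle : a.toNat &&& n ≤ a.toNat := Nat.and_le_left
    have hand : (a.toNat &&& n).testBit 0 = (a.toNat.testBit 0 && n.testBit 0) := Nat.testBit_and _ _ 0
    rw [hnb]
    rw [Nat.testBit_zero] at hand ⊢
    rw [Nat.testBit_zero, Nat.testBit_zero] at hand ⊢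
    rw [← Bool.decide_and, decide_eq_decide] at hand
    rw [← decide_not, ← Bool.decide_and, decide_eq_decide]
    omega

theorem pv_shr_nonneg (a : Int) (k : Nat) (h : 0 ≤ a) : 0 ≤ Int.shiftRight a k := by
  cases a with
  | ofNat m => exact Int.natCast_nonneg _
  | negSucc m => exact absurd h (by simp [Int.negSucc_eq]; omega)

-- one term of B's inner loop reads the product of two bits
theorem pv_term (S C : Int) (hC : 0 ≤ C) (i j : Nat) :
    PySem.Int.band (PySem.Int.band (Int.shiftRight C i) (Int.shiftRight S j)) 1
      = if (C.testBit i && S.testBit j) then 1 else 0 := by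
  rw [pv_band_one, pv_testBit0_band _ _ (pv_shr_nonneg C i hC), pv_testBit_shr, pv_testBit_shr,
      Nat.zero_add, Nat.zero_add]

theorem pv_bitz_bxor (a b : Int) (k : Nat) :
    pvBitz (PySem.Int.bxor a b) k = pvBitz a k + pvBitz b k := by
  unfold pvBitz
  rw [pv_testBit_bxor]
  cases h1 : a.testBit k <;> cases h2 : b.testBit k <;> decide

theorem pv_bitz_shl1 (a : Int) (m : Nat) :
    pvBitz (Int.shiftLeft a 1) m = if m = 0 then 0 else pvBitz a (m - 1) := by
  unfold pvBitz
  cases m with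
  | zero => simp [pv_testBit_shl1_zero]
  | succ m' => simp [pv_testBit_shl1_succ]

-- the convolution is linear in C
theorem pv_pconv_bxor (S C B : Int) (n k : Nat) :
    pvPconv S (PySem.Int.bxor C B) n k = pvPconv S C n k + pvPconv S B n k := by
  unfold pvPconv
  rw [← Finset.sum_add_distrib]
  refine Finset.sum_congr rfl (fun i _ => ?_)
  rw [pv_bitz_bxor, add_mul]

theorem pv_conv_bxor (S C B : Int) (n : Nat) :
    pvConv S (PySem.Int.bxor C B) n = pvConv S C n + pvConv S B n := pv_pconv_bxor S C B n (n + 1)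

-- shifting C shifts the convolution
theorem pv_conv_shl1 (S B : Int) (n : Nat) :
    pvConv S (Int.shiftLeft B 1) n = if n = 0 then 0 else pvConv S B (n - 1) := by
  unfold pvConv pvPconv
  rw [Finset.sum_range_succ']
  have h0 : pvBitz (Int.shiftLeft B 1) 0 * pvBitz S (n - 0) = 0 := by
    rw [pv_bitz_shl1]; simp
  rw [h0, add_zero]
  cases n with
  | zero => simp
  | succ m =>
    simp only [Nat.succ_ne_zero, if_false, Nat.succ_sub_one]
    refine Finset.sum_congr rfl (fun i _ => ?_)
    rw [pv_bitz_shl1]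
    simp [Nat.succ_sub_succ]

theorem pv_bitz_one (i : Nat) : pvBitz 1 i = if i = 0 then 1 else 0 := by
  unfold pvBitz
  cases i with
  | zero => simp [Int.testBit, Nat.testBit_zero]
  | succ i' =>
    have h : (1 : Int).testBit (i' + 1) = false := by
      show (Int.ofNat 1).testBit (i' + 1) = false
      simp [Int.testBit, Nat.testBit_succ]
    simp [h]

-- the convolution with C = 1 reads a bit of S
theorem pv_conv_one (S : Int) (n : Nat) : pvConv S 1 n = pvBitz S n := by
  unfold pvConv pvPconv
  rw [Finset.sum_eq_single 0]
  · simp [pv_bitz_one]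
  · intro i _ hi; simp [pv_bitz_one, hi]
  · intro h; exact absurd (Finset.mem_range.2 (Nat.succ_pos n)) h

-- B's inner loop computes the discrepancy bit of the convolution
theorem pv_disc_partial (S C : Int) (hC : 0 ≤ C) (n : Nat) : ∀ k : Nat,
    (List.range k).foldl
      (fun d i => PySem.Int.bxor d
        (PySem.Int.band (PySem.Int.band (Int.shiftRight C i) (Int.shiftRight S (n - i))) 1)) 0
    = if pvPconv S C n k = 1 then 1 else 0 := by
  intro k
  induction k with
  | zero => simp [pvPconv]
  | succ k ih =>
    rw [List.range_succ, List.foldl_append, ih, List.foldl_cons, List.foldl_nil]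
    rw [pv_term S C hC k (n - k)]
    have hsum : pvPconv S C n (k + 1) = pvPconv S C n k + pvBitz C k * pvBitz S (n - k) := by
      unfold pvPconv
      rw [Finset.sum_range_succ]
    have h2 : ∀ z : ZMod 2, z = 0 ∨ z = 1 := by decide
    rcases h2 (pvPconv S C n k) with hp | hp <;>
      cases hc : C.testBit k <;> cases hs : S.testBit (n - k) <;>
        first
        | (simp [hsum, hp, pvBitz, hc, hs]; decide)
        | simp [hsum, hp, pvBitz, hc, hs]

-- bits of a nonnegative integer above its bit length are zero, so the truncated
-- partial convolution already equals the full one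
theorem pv_pconv_trunc (S C : Int) (hC : 0 ≤ C) (n : Nat) :
    pvPconv S C n (min (n + 1) (PySem.Int.bitLength C)) = pvConv S C n := by
  unfold pvConv pvPconv
  apply Finset.sum_subset
  · intro i hi
    exact Finset.mem_range.2 (lt_of_lt_of_le (Finset.mem_range.1 hi) (min_le_left _ _))
  · intro i hi hnot
    have hbl : PySem.Int.bitLength C ≤ i := by
      have h1 := Finset.mem_range.1 hi
      have h2 : ¬ (i < min (n + 1) (PySem.Int.bitLength C)) := fun h => hnot (Finset.mem_range.2 h)
      omega
    have hlt : C.natAbs < 2 ^ i :=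
      lt_of_lt_of_le (PySem.Int.lt_two_pow_bitLength C) (Nat.pow_le_pow_right (by norm_num) hbl)
    have htb : C.testBit i = false := by
      have e : C = ((C.natAbs : Nat) : Int) := by omega
      rw [e]
      show C.natAbs.testBit i = false
      exact Nat.testBit_lt_two_pow hlt
    unfold pvBitz
    rw [htb]
    simp

theorem pv_disc_eq (S C : Int) (hC : 0 ≤ C) (n : Nat) :
    pvDisc S C n = if pvConv S C n = 1 then 1 else 0 := by
  unfold pvDisc
  rw [pv_disc_partial S C hC n (min (n + 1) (PySem.Int.bitLength C)),
      pv_pconv_trunc S C hC n]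

theorem pv_inv_shl (S SB B : Int) (h : ∀ m, pvBitz SB m = pvConv S B m) :
    ∀ m, pvBitz (Int.shiftLeft SB 1) m = pvConv S (Int.shiftLeft B 1) m := by
  intro m
  rw [pv_bitz_shl1, pv_conv_shl1]
  cases m with
  | zero => simp
  | succ m' => simp [h]

-- the invariant relating A's loop state (B, C, SB, SC, L) to B's (C, L, b, m):
-- same C and L, A's shifted register satisfies B << 1 = b << m, signs and parity of C,
-- and the SB/SC accumulators carry the convolutions of B and C with S
def pvRel (S : Int) (sa : Int × Int × Int × Int × Int) (sb : Int × Int × Int × Nat) : Prop :=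
  sb.1 = sa.2.1 ∧ sb.2.1 = sa.2.2.2.2 ∧
  Int.shiftLeft sa.1 1 = Int.shiftLeft sb.2.2.1 sb.2.2.2 ∧
  0 ≤ sa.1 ∧ 0 ≤ sa.2.1 ∧ 0 ≤ sb.2.2.1 ∧ sa.2.1.testBit 0 = true ∧
  (∀ m, pvBitz sa.2.2.1 m = pvConv S sa.1 m) ∧
  (∀ m, pvBitz sa.2.2.2.1 m = pvConv S sa.2.1 m)

theorem pv_step (S : Int) (sa : Int × Int × Int × Int × Int) (sb : Int × Int × Int × Nat)
    (n : Nat) (h : pvRel S sa sb) :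
    pvRel S (pvStepA S sa ((n : Nat) : Int))
      (let d := pvDisc S sb.1 n
       if d ≠ 0 then
         if 2 * sb.2.1 ≤ (n : Int) then
           (PySem.Int.bxor sb.1 (Int.shiftLeft sb.2.2.1 sb.2.2.2), (n : Int) + 1 - sb.2.1, sb.1, 1)
         else
           (PySem.Int.bxor sb.1 (Int.shiftLeft sb.2.2.1 sb.2.2.2), sb.2.1, sb.2.2.1, sb.2.2.2 + 1)
       else (sb.1, sb.2.1, sb.2.2.1, sb.2.2.2 + 1)) := by
  obtain ⟨B, C, SB, SC, L⟩ := sa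
  obtain ⟨C', L', b, m⟩ := sb
  obtain ⟨hC, hL, hBm, hBnn, hCnn, hbnn, hCodd, hSB, hSC⟩ := h
  simp only at hC hL hBm hBnn hCnn hbnn hCodd hSB hSC
  subst hC hL
  simp only [pvStepA]
  -- A's dead branch: C is odd, so T = SC
  rw [if_neg (show ¬ PySem.Int.band C' 1 = 0 by rw [pv_band_one, hCodd]; norm_num)]
  have htn : ((n : Int)).toNat = n := Int.toNat_natCast n
  rw [htn, pv_band_one, pv_testBit_shr, Nat.zero_add]
  -- A's condition reads bit n of SC, which is the convolution bit
  have hbit : (if SC.testBit n then (1 : Int) else 0) ≠ 0 ↔ pvConv S C' n = 1 := by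
    have h3 := hSC n
    unfold pvBitz at h3
    cases hsc : SC.testBit n
    · rw [hsc] at h3; simp [← h3]
    · rw [hsc] at h3; simp [← h3]
  -- B's condition is the same bit via the inner convolution loop
  have hdisc : (pvDisc S C' n ≠ 0) ↔ pvConv S C' n = 1 := by
    rw [pv_disc_eq S C' hCnn n]
    by_cases hcv : pvConv S C' n = 1 <;> simp [hcv]
  -- shared facts about the shifted values
  have hBs : 0 ≤ Int.shiftLeft B 1 := pv_shl_nonneg B 1 hBnn
  have hCB : 0 ≤ PySem.Int.bxor C' (Int.shiftLeft B 1) := by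
    rw [PySem.Int.bxor_of_nonneg hCnn hBs]; exact Int.natCast_nonneg _
  have hCBodd : (PySem.Int.bxor C' (Int.shiftLeft B 1)).testBit 0 = true := by
    rw [pv_testBit_bxor, hCodd, pv_testBit_shl1_zero]; rfl
  have hSBs := pv_inv_shl S SB B hSB
  have hinvCB : ∀ mm, pvBitz (PySem.Int.bxor SC (Int.shiftLeft SB 1)) mm
      = pvConv S (PySem.Int.bxor C' (Int.shiftLeft B 1)) mm := by
    intro mm
    rw [pv_bitz_bxor, pv_conv_bxor, hSC mm, hSBs mm]
  -- B's update uses b << m, which equals A's shifted B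
  have hBb : PySem.Int.bxor C' (Int.shiftLeft B 1) = PySem.Int.bxor C' (Int.shiftLeft b m) := by
    rw [hBm]
  by_cases hcv : pvConv S C' n = 1
  · rw [if_pos (hbit.2 hcv)]
    simp only [if_pos (hdisc.2 hcv)]
    by_cases hl : 2 * L' ≤ (n : Int)
    · rw [if_pos hl]
      simp only [if_pos hl]
      exact ⟨hBb.symm, rfl, rfl, hCnn, hCB, hCnn, hCBodd, hSC, hinvCB⟩
    · rw [if_neg hl]
      simp only [if_neg hl]
      refine ⟨hBb.symm, rfl, ?_, hBs, hCB, hbnn, hCBodd, hSBs, hinvCB⟩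
      simp only
      rw [hBm, pv_shl_shl]
  · rw [if_neg (fun hh => hcv (hbit.1 hh))]
    simp only [if_neg (fun hh => hcv (hdisc.1 hh))]
    refine ⟨rfl, rfl, ?_, hBs, hCnn, hbnn, hCodd, hSBs, hSC⟩
    simp only
    rw [hBm, pv_shl_shl]

theorem pv_run (S : Int) (k : Nat) : ∀ (n : Nat) (sa : Int × Int × Int × Int × Int)
    (sb : Int × Int × Int × Nat), pvRel S sa sb →
    pvRel S (((List.range' n k).map Int.ofNat).foldl (pvStepA S) sa) (pvRunB S n k sb) := by
  induction k with
  | zero => intro n sa sb h; simpa [pvRunB] using h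
  | succ k ih =>
    intro n sa sb h
    obtain ⟨C', L', b, m⟩ := sb
    have hstep := pv_step S sa (C', L', b, m) n h
    rw [show List.range' n (k + 1) = n :: List.range' (n + 1) k from rfl, List.map_cons,
        List.foldl_cons]
    simp only [pvRunB]
    exact ih (n + 1) _ _ hstep

theorem pv_pyRange_eq (len : Int) :
    PySem.List.pyRange 0 len 1 = (List.range' 0 len.toNat).map Int.ofNat := by
  rw [PySem.List.pyRange_one, ← List.range_eq_range']
  simp [Int.ofNat_eq_natCast]

theorem pv_main (S len : Int) :
    (((PySem.List.pyRange 0 len 1).foldl (pvStepA S) (1, 1, S, S, 0)).2.2.2.2,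
     ((PySem.List.pyRange 0 len 1).foldl (pvStepA S) (1, 1, S, S, 0)).2.1)
    = ((pvRunB S 0 len.toNat (1, 0, 1, 1)).2.1, (pvRunB S 0 len.toNat (1, 0, 1, 1)).1) := by
  have h0 : pvRel S (1, 1, S, S, 0) (1, 0, 1, 1) := by
    refine ⟨rfl, rfl, rfl, by norm_num, by norm_num, by norm_num, by rfl, ?_, ?_⟩ <;>
      · intro m; simp only; rw [pv_conv_one]
  have h := pv_run S len.toNat 0 (1, 1, S, S, 0) (1, 0, 1, 1) h0
  rw [← pv_pyRange_eq] at h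
  obtain ⟨h1, h2, -⟩ := h
  exact Prod.ext_iff.2 ⟨h2.symm, h1.symm⟩

-- ===== VERDICT (by name: the statement is the Claim_ definition above) =====
theorem BerlekampMassey0_spec : Claim_equal_BerlekampMassey0 := by
  intro S length _
  show BerlekampMassey0 S length = BerlekampMassey0_alt S length
  unfold BerlekampMassey0 BerlekampMassey0_alt
  exact pv_main S _
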